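-- pv_equiv track=rewrite | github.com/AdamZhouSE/pythonHomework | Code/CodeRecords/2866/60797/290250.py | find
-- ===== SOURCE A (Python) =====
-- def find(n, data):
--     re = 1
--     count = 0
--     sign = 0
--     for i in range(n):
--         if data[i]==0:
--             count += 1
--         else:
--             if sign == 0:
--                 sign = 1
--             else:
--                 re *= count+1
--                 count = 0
--     return re
-- ===== SOURCE B (Python) =====
-- def find(n, data):
--     positions = [i for i in range(n) if data[i] != 0]
--     re = 1
--     prev = 0
--     for pos in positions[1:]:
--         re *= pos - prev
--         prev = pos
--     return re
-- ===== Notes on version B (the rewrite author's own statement) =====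
-- stated objective: alternative
-- what changed: Replaces A's single stateful scan carrying (re, count, sign) by a two-phase decomposition: first collect the indices of the nonzero separators, then multiply consecutive position differences (the first factor measured from index 0, matching A's folding of leading zeros into the first run).
import Mathlib
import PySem

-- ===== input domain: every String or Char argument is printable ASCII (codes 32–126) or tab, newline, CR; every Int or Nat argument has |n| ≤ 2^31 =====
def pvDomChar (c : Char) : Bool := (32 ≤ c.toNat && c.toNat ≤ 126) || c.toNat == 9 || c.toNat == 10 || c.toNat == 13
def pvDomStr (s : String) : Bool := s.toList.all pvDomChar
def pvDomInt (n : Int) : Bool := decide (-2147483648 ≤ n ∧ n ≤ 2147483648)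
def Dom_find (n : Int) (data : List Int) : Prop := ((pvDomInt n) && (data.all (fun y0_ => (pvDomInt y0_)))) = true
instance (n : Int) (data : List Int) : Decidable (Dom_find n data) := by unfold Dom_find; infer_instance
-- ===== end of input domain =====

-- B replaces A's single stateful scan (re,count,sign) by a two-phase decomposition:
-- collect nonzero positions, then multiply consecutive position differences (alternative, same cost).


-- ===== PORT A =====
-- loop body of A: state (re, count, sign)
def stepA (data : List Int) (st : Int × Int × Int) (i : Int) : Int × Int × Int :=
  if (PySem.List.pyGet? data i).getD 0 = 0 then (st.1, st.2.1 + 1, st.2.2)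
  else if st.2.2 = 0 then (st.1, st.2.1, 1)
  else (st.1 * (st.2.1 + 1), 0, st.2.2)

def find (n : Int) (data : List Int) : Int :=
  ((PySem.List.pyRange 0 n 1).foldl (stepA data) (1, 0, 0)).1

-- ===== PORT B =====
-- loop body of B: state (re, prev)
def stepB (st : Int × Int) (pos : Int) : Int × Int := (st.1 * (pos - st.2), pos)

def find_alt (n : Int) (data : List Int) : Int :=
  ((PySem.List.slice ((PySem.List.pyRange 0 n 1).filter
      (fun i => (PySem.List.pyGet? data i).getD 0 != 0)) (some 1) none).foldl stepB (1, 0)).1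

-- ===== PRECONDITION & SPEC =====
-- A (and B) raise IndexError exactly when n > len(data); Pre_ excludes precisely those inputs.
def Pre_find (n : Int) (data : List Int) : Prop := n ≤ (data.length : Int)
instance (n : Int) (data : List Int) : Decidable (Pre_find n data) := by unfold Pre_find; infer_instance
def pvWitness_find : Int × List Int := (3, [0, 5, 0])

def Spec_find (n : Int) (data : List Int) (out : Int) : Prop := out = find_alt n data
instance (n : Int) (data : List Int) (out : Int) : Decidable (Spec_find n data out) := by unfold Spec_find; infer_instance

-- ===== CLAIM (what is proved, stated in full; the proofs are below) =====
def Claim_equal_find : Prop := ∀ (n : Int) (data : List Int), Dom_find n data → Pre_find n data → Spec_find n data (find n data)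

-- ===== LEMMAS AND PROOFS =====

-- Loop invariant relating A's fold state to B's: with P the nonzero positions among 0..m-1,
-- A's state is (1, m, 0) while P is empty, and (re_B, m-1-prev_B, 1) afterwards.
lemma find_inv (data : List Int) (m : Nat) :
    (PySem.List.pyRange 0 (m : Int) 1).foldl (stepA data) (1, 0, 0) =
      (if ((PySem.List.pyRange 0 (m : Int) 1).filter
            (fun i => (PySem.List.pyGet? data i).getD 0 != 0)) = [] then
        ((1 : Int), (m : Int), (0 : Int))
      else
        (((((PySem.List.pyRange 0 (m : Int) 1).filter
              (fun i => (PySem.List.pyGet? data i).getD 0 != 0)).tail).foldl stepB (1, 0)).1,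
         (m : Int) - 1 - ((((PySem.List.pyRange 0 (m : Int) 1).filter
              (fun i => (PySem.List.pyGet? data i).getD 0 != 0)).tail).foldl stepB (1, 0)).2,
         1)) := by
  induction m with
  | zero => simp [PySem.List.pyRange_one_eq_nil]
  | succ m ih =>
    have hcast : ((m + 1 : Nat) : Int) = (m : Int) + 1 := by push_cast; ring
    have hsplit : PySem.List.pyRange 0 ((m : Int) + 1) 1
        = PySem.List.pyRange 0 (m : Int) 1 ++ [(m : Int)] :=
      PySem.List.pyRange_one_succ_right (by positivity)
    rw [hcast, hsplit]
    rw [List.foldl_append, List.filter_append, ih]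
    by_cases hz : ((PySem.List.pyGet? data (m : Int)).getD 0 = 0)
    · -- data[m] == 0 : filter drops m, A increments count
      have hz' : (data[m]?.getD 0 : Int) = 0 := by simpa using hz
      have hf : (List.filter (fun i => (PySem.List.pyGet? data i).getD 0 != 0) [(m : Int)]) = [] := by
        simp [List.filter, hz']
      rw [hf, List.append_nil]
      by_cases hP : ((PySem.List.pyRange 0 (m : Int) 1).filter
          (fun i => (PySem.List.pyGet? data i).getD 0 != 0)) = []
      · simp only [hP, if_pos, List.foldl, stepA, hz]
      · simp only [if_neg hP, List.foldl, stepA, hz, if_pos, Prod.mk.injEq]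
        exact ⟨trivial, by ring, trivial⟩
    · -- data[m] != 0 : filter keeps m
      have hz' : ¬ ((data[m]?.getD 0 : Int) = 0) := by simpa using hz
      have hf : (List.filter (fun i => (PySem.List.pyGet? data i).getD 0 != 0) [(m : Int)])
          = [(m : Int)] := by
        have hb : ((data[m]?.getD 0 : Int) != 0) = true := by simpa using hz'
        simp [List.filter, hb]
      rw [hf]
      by_cases hP : ((PySem.List.pyRange 0 (m : Int) 1).filter
          (fun i => (PySem.List.pyGet? data i).getD 0 != 0)) = []
      · -- first separator: sign flips, B's prev stays 0
        simp only [hP, if_pos, List.nil_append, List.foldl, stepA, if_neg hz]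
        simp
      · -- later separator: re *= count+1  vs  re *= pos - prev
        have hne : ((PySem.List.pyRange 0 (m : Int) 1).filter
            (fun i => (PySem.List.pyGet? data i).getD 0 != 0)) ++ [(m : Int)] ≠ [] := by
          simp
        have htail : (((PySem.List.pyRange 0 (m : Int) 1).filter
              (fun i => (PySem.List.pyGet? data i).getD 0 != 0)) ++ [(m : Int)]).tail
            = (((PySem.List.pyRange 0 (m : Int) 1).filter
              (fun i => (PySem.List.pyGet? data i).getD 0 != 0)).tail) ++ [(m : Int)] := by
          obtain ⟨x, xs, hx⟩ := List.exists_cons_of_ne_nil hP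
          rw [hx]; rfl
        simp only [if_neg hP, List.foldl, stepA, if_neg hz]
        simp only [if_neg hne, htail, List.foldl_append, List.foldl, stepB]
        rw [if_neg (by norm_num : ¬ (1 : Int) = 0)]
        exact Prod.ext (by ring) (Prod.ext (by ring) rfl)

-- ===== VERDICT (by name: the statement is the Claim_ definition above) =====
theorem find_spec : Claim_equal_find := by
  intro n data _hdom _hpre
  unfold Spec_find find find_alt
  by_cases hn : n ≤ 0
  · rw [PySem.List.pyRange_one_eq_nil (by omega)]
    simp [PySem.List.slice_from_one]
  · have hcast : n = ((n.toNat : Nat) : Int) := by omega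
    rw [hcast, find_inv data n.toNat, PySem.List.slice_from_one]
    by_cases hP : ((PySem.List.pyRange 0 ((n.toNat : Nat) : Int) 1).filter
        (fun i => (PySem.List.pyGet? data i).getD 0 != 0)) = []
    · rw [if_pos hP, hP]
      rfl
    · rw [if_neg hP]
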